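-- pv_equiv track=rewrite | github.com/sanath-kumar-s/Python-beginner-projects | MarkDownIDE/main.py | parse_alerts
-- ===== SOURCE A (Python) =====
-- def parse_alerts(text):
--     lines = text.split("\n")
--     result = []
--
--     for line in lines:
--         stripped = line.strip()
--
--         if stripped.startswith(">[!NOTE]"):
--             content = stripped.replace(">[!NOTE]", "").strip()
--             result.append(f'<div class="alert alert-note">📝 {content}</div>')
--
--         elif stripped.startswith(">[!WARNING]"):
--             content = stripped.replace(">[!WARNING]", "").strip()
--             result.append(f'<div class="alert alert-warning">⚠️ {content}</div>')
--
--         elif stripped.startswith(">[!TIP]"):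
--             content = stripped.replace(">[!TIP]", "").strip()
--             result.append(f'<div class="alert alert-tip">💡 {content}</div>')
--
--         elif stripped.startswith(">[!DANGER]"):
--             content = stripped.replace(">[!DANGER]", "").strip()
--             result.append(f'<div class="alert alert-danger">🚨 {content}</div>')
--
--         else:
--             result.append(line)
--
--     return "\n".join(result)
-- ===== SOURCE B (Python) =====
-- ALERT_STYLES = {
--     "NOTE": ("note", "\U0001F4DD"),
--     "WARNING": ("warning", "\u26A0\uFE0F"),
--     "TIP": ("tip", "\U0001F4A1"),
--     "DANGER": ("danger", "\U0001F6A8"),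
-- }
--
--
-- def _render(line):
--     s = line.strip()
--     if s.startswith(">[!"):
--         end = s.find("]")
--         if end != -1:
--             tag = s[3:end]
--             style = ALERT_STYLES.get(tag)
--             if style is not None:
--                 suffix, emoji = style
--                 content = s.replace(">[!" + tag + "]", "").strip()
--                 return f'<div class="alert alert-{suffix}">{emoji} {content}</div>'
--     return line
--
--
-- def parse_alerts(text):
--     return "\n".join(_render(line) for line in text.split("\n"))
-- ===== Notes on version B (the rewrite author's own statement) =====
-- stated objective: alternative
-- what changed: B does not test the four marker prefixes at all: it parses the bracket syntax once (checks '>[!', locates the first ']', extracts the tag between them) and looks the tag up in a dict keyed by tag name; equal tags reconstruct exactly A's marker strings, so the rendered lines coincide.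
import Mathlib
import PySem

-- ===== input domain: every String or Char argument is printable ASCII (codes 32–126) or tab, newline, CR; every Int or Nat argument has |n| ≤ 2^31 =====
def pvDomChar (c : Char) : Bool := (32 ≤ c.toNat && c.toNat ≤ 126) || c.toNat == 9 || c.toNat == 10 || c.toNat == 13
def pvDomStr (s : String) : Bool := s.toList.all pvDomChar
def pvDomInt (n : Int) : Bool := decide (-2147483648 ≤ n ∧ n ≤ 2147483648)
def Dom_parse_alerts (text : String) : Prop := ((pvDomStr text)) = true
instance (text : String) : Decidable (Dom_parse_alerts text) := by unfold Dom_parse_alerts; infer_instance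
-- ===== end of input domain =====

-- B parses the '>[!TAG]' bracket syntax once (first ']', tag between) and keys a dict by tag name,
-- instead of A's four prefix tests; a genuinely different mechanism of the same cost.

-- ===== PORT A =====
def parse_alerts (text : String) : String :=
  let lines := (PySem.Str.split? text "\n").getD []
  let result := lines.foldl (fun result line =>
    let stripped := PySem.Str.strip line
    if PySem.Str.startswith stripped ">[!NOTE]" then
      result ++ ["<div class=\"alert alert-note\">📝 " ++ PySem.Str.strip (PySem.Str.replace stripped ">[!NOTE]" "") ++ "</div>"]
    else if PySem.Str.startswith stripped ">[!WARNING]" then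
      result ++ ["<div class=\"alert alert-warning\">⚠️ " ++ PySem.Str.strip (PySem.Str.replace stripped ">[!WARNING]" "") ++ "</div>"]
    else if PySem.Str.startswith stripped ">[!TIP]" then
      result ++ ["<div class=\"alert alert-tip\">💡 " ++ PySem.Str.strip (PySem.Str.replace stripped ">[!TIP]" "") ++ "</div>"]
    else if PySem.Str.startswith stripped ">[!DANGER]" then
      result ++ ["<div class=\"alert alert-danger\">🚨 " ++ PySem.Str.strip (PySem.Str.replace stripped ">[!DANGER]" "") ++ "</div>"]
    else
      result ++ [line]) []
  PySem.Str.join "\n" result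

-- ===== PORT B =====
def pvAlertStyles : PySem.Dict String (String × String) :=
  PySem.Dict.mk
    [("NOTE", ("note", "📝")),
     ("WARNING", ("warning", "⚠️")),
     ("TIP", ("tip", "💡")),
     ("DANGER", ("danger", "🚨"))]

def pvRender (line : String) : String :=
  let s := PySem.Str.strip line
  if PySem.Str.startswith s ">[!" then
    let e := PySem.Str.find s "]"
    if e ≠ -1 then
      let tag := PySem.Str.slice s (some 3) (some e)
      match pvAlertStyles.get? tag with
      | some (suffix, emoji) =>
          "<div class=\"alert alert-" ++ suffix ++ "\">" ++ emoji ++ " " ++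
            PySem.Str.strip (PySem.Str.replace s (">[!" ++ tag ++ "]") "") ++ "</div>"
      | none => line
    else line
  else line

def parse_alerts_alt (text : String) : String :=
  PySem.Str.join "\n" (((PySem.Str.split? text "\n").getD []).map pvRender)

-- ===== PRECONDITION & SPEC =====
def Spec_parse_alerts (text : String) (out : String) : Prop := out = parse_alerts_alt text
instance (text : String) (out : String) : Decidable (Spec_parse_alerts text out) := by unfold Spec_parse_alerts; infer_instance

-- ===== CLAIM (what is proved, stated in full; the proofs are below) =====
def Claim_equal_parse_alerts : Prop := ∀ (text : String), Dom_parse_alerts text → Spec_parse_alerts text (parse_alerts text)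

-- ===== LEMMAS AND PROOFS =====

theorem pv_single_prefix (c : Char) (l : List Char) : [c] <+: l ↔ l.head? = some c := by
  cases l with
  | nil => simp
  | cons a t => simp [List.cons_prefix_cons, eq_comm]

theorem pv_find_char_eq (s : List Char) (c : Char) (k : Nat)
    (hk : s[k]? = some c) (hmin : ∀ i < k, s[i]? ≠ some c) :
    PySem.Chars.find s [c] = (k : Int) := by
  have hpre : [c] <+: s.drop k := by rw [pv_single_prefix, List.head?_drop]; exact hk
  have hin : PySem.Chars.isIn [c] s = true :=
    (PySem.Chars.exists_prefix_drop_iff_isIn _ _).mp ⟨k, hpre⟩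
  have hnn : 0 ≤ PySem.Chars.find s [c] := by
    rw [PySem.Chars.find_nonneg_iff]
    exact (PySem.Chars.isIn_iff_infix _ _).mp hin
  obtain ⟨h1, h2⟩ := PySem.Chars.find_spec (s := s) (sub := [c]) hnn
  have hne : (PySem.Chars.find s [c]).toNat = k := by
    rcases lt_trichotomy (PySem.Chars.find s [c]).toNat k with h | h | h
    · exact absurd ((pv_single_prefix _ _).mp h1) (by
        rw [List.head?_drop]; exact hmin _ h)
    · exact h
    · exact absurd hpre (h2 k h)
  omega

theorem pv_marker_iff (s T : List Char) (hne : ']' ∉ T) (h3 : ['>', '[', '!'] <+: s) :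
    (('>' :: '[' :: '!' :: (T ++ [']'])) <+: s) ↔
      (0 ≤ PySem.Chars.find s [']'] ∧
        (s.drop 3).take ((PySem.Chars.find s [']']).toNat - 3) = T) := by
  constructor
  · rintro ⟨r, rfl⟩
    have hshape : ('>' :: '[' :: '!' :: (T ++ [']']) ++ r) = ['>','[','!'] ++ (T ++ ']' :: r) := by simp
    have hfind : PySem.Chars.find ('>' :: '[' :: '!' :: (T ++ [']']) ++ r) [']'] = ((3 + T.length : Nat) : Int) := by
      apply pv_find_char_eq
      · rw [hshape, List.getElem?_append_right (by simp)]
        have : 3 + T.length - (['>','[','!'] : List Char).length = T.length := by simp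
        rw [this, List.getElem?_append_right (le_refl _)]
        simp
      · intro i hi
        rw [hshape]
        rcases Nat.lt_or_ge i 3 with h | h
        · rw [List.getElem?_append_left (by simpa using h)]
          interval_cases i <;> simp
        · rw [List.getElem?_append_right (by simpa using h)]
          rw [List.getElem?_append_left (by simp; omega)]
          intro hc
          exact hne (List.mem_of_getElem? hc)
    refine ⟨by rw [hfind]; positivity, ?_⟩
    rw [hfind]
    have h1 : ((((3 + T.length : Nat) : Int)).toNat - 3) = T.length := by omega
    rw [h1]
    have hdrop : ('>' :: '[' :: '!' :: (T ++ [']']) ++ r).drop 3 = T ++ (']' :: r) := by simp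
    rw [hdrop, List.take_append_of_le_length (le_refl _)]
    simp
  · rintro ⟨hnn, htake⟩
    obtain ⟨r3, rfl⟩ := h3
    obtain ⟨n, hnEq⟩ := Int.eq_ofNat_of_zero_le hnn
    obtain ⟨h1, h2⟩ := PySem.Chars.find_spec (s := ['>','[','!'] ++ r3) (sub := [']']) hnn
    rw [hnEq] at h1 htake
    simp only [Int.toNat_natCast] at h1 htake
    have hgetn : (['>','[','!'] ++ r3)[n]? = some ']' := by
      rw [← List.head?_drop, ← pv_single_prefix]; exact h1
    have h3n : 3 ≤ n := by
      rcases Nat.lt_or_ge n 3 with h | h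
      · interval_cases n <;> simp_all
      · exact h
    have hr3get : r3[n - 3]? = some ']' := by
      rw [List.getElem?_append_right (by simpa using h3n)] at hgetn
      simpa using hgetn
    have hdrop3 : ((['>','[','!'] : List Char) ++ r3).drop 3 = r3 := by simp
    rw [hdrop3] at htake
    have hsplit : r3 = T ++ r3.drop (n - 3) := by
      conv_lhs => rw [← List.take_append_drop (n - 3) r3]
      rw [htake]
    have htail : ∃ rest, r3.drop (n - 3) = ']' :: rest := by
      have hhd : (r3.drop (n - 3)).head? = some ']' := by rw [List.head?_drop]; exact hr3get
      cases hcase : r3.drop (n - 3) with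
      | nil => rw [hcase] at hhd; simp at hhd
      | cons a t => rw [hcase] at hhd; simp at hhd; exact ⟨t, by rw [hhd]⟩
    obtain ⟨rest, hrest⟩ := htail
    refine ⟨rest, ?_⟩
    rw [hsplit, hrest]
    simp


theorem pv_strmarker_iff (st T : String) (hne : ']' ∉ T.toList)
    (hp : PySem.Str.startswith st ">[!" = true) :
    (PySem.Str.startswith st (">[!" ++ T ++ "]") = true ↔
      (0 ≤ PySem.Str.find st "]" ∧
        PySem.Str.slice st (some 3) (some (PySem.Str.find st "]")) = T)) := by
  have h3 : ['>','[','!'] <+: st.toList := by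
    rw [← PySem.Chars.startswith_iff]
    simpa using hp
  have hfind : PySem.Str.find st "]" = PySem.Chars.find st.toList [']'] := by
    simp
  have hsliceL : (PySem.Str.slice st (some 3) (some (PySem.Str.find st "]"))).toList
      = PySem.List.slice st.toList (some 3) (some (PySem.Str.find st "]")) := by
    simp
  constructor
  · intro h
    have hm : ('>' :: '[' :: '!' :: (T.toList ++ [']'])) <+: st.toList := by
      have := (PySem.Chars.startswith_iff st.toList (">[!" ++ T ++ "]").toList).mp (by simpa using h)
      simpa using this
    obtain ⟨hnn, htake⟩ := (pv_marker_iff st.toList T.toList hne h3).mp hm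
    have hnn' : 0 ≤ PySem.Str.find st "]" := by rw [hfind]; exact hnn
    refine ⟨hnn', ?_⟩
    apply String.toList_inj.mp
    rw [hsliceL, hfind, PySem.List.slice_toNat st.toList (by norm_num) hnn]
    simpa using htake
  · rintro ⟨hnn, hslice⟩
    have hnn' : 0 ≤ PySem.Chars.find st.toList [']'] := by rw [← hfind]; exact hnn
    have htake : (st.toList.drop 3).take ((PySem.Chars.find st.toList [']']).toNat - 3) = T.toList := by
      have := congrArg String.toList hslice
      rw [hsliceL, hfind, PySem.List.slice_toNat st.toList (by norm_num) hnn'] at this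
      simpa using this
    have hm := (pv_marker_iff st.toList T.toList hne h3).mpr ⟨hnn', htake⟩
    rw [← PySem.Chars.startswith_iff] at hm
    simpa using hm


theorem pv_cat_note : (">[!" ++ "NOTE" ++ "]" : String) = ">[!NOTE]" := by decide
theorem pv_cat_warning : (">[!" ++ "WARNING" ++ "]" : String) = ">[!WARNING]" := by decide
theorem pv_cat_tip : (">[!" ++ "TIP" ++ "]" : String) = ">[!TIP]" := by decide
theorem pv_cat_danger : (">[!" ++ "DANGER" ++ "]" : String) = ">[!DANGER]" := by decide

-- a marker prefix implies the '>[!' prefix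
theorem pv_sw_of_marker (st m : String) (h : PySem.Str.startswith st m = true)
    (hm : (">[!" : String).toList <+: m.toList) :
    PySem.Str.startswith st ">[!" = true := by
  rw [PySem.Str.startswith_eq] at h ⊢
  rw [PySem.Chars.startswith_iff] at h ⊢
  exact hm.trans h

set_option maxHeartbeats 1000000 in
theorem pvBody_eq (line : String) :
    (let stripped := PySem.Str.strip line
    if PySem.Str.startswith stripped ">[!NOTE]" then
      "<div class=\"alert alert-note\">📝 " ++ PySem.Str.strip (PySem.Str.replace stripped ">[!NOTE]" "") ++ "</div>"
    else if PySem.Str.startswith stripped ">[!WARNING]" then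
      "<div class=\"alert alert-warning\">⚠️ " ++ PySem.Str.strip (PySem.Str.replace stripped ">[!WARNING]" "") ++ "</div>"
    else if PySem.Str.startswith stripped ">[!TIP]" then
      "<div class=\"alert alert-tip\">💡 " ++ PySem.Str.strip (PySem.Str.replace stripped ">[!TIP]" "") ++ "</div>"
    else if PySem.Str.startswith stripped ">[!DANGER]" then
      "<div class=\"alert alert-danger\">🚨 " ++ PySem.Str.strip (PySem.Str.replace stripped ">[!DANGER]" "") ++ "</div>"
    else
      line) = pvRender line := by
  unfold pvRender
  generalize PySem.Str.strip line = st
  by_cases hp : PySem.Str.startswith st ">[!" = true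
  · by_cases hnn : 0 ≤ PySem.Str.find st "]"
    · have hiffN := pv_strmarker_iff st "NOTE" (by decide) hp
      have hiffW := pv_strmarker_iff st "WARNING" (by decide) hp
      have hiffT := pv_strmarker_iff st "TIP" (by decide) hp
      have hiffD := pv_strmarker_iff st "DANGER" (by decide) hp
      rw [pv_cat_note] at hiffN
      rw [pv_cat_warning] at hiffW
      rw [pv_cat_tip] at hiffT
      rw [pv_cat_danger] at hiffD
      have hne : ¬ (PySem.Str.find st "]" = -1) := by omega
      by_cases hN : PySem.Str.slice st (some 3) (some (PySem.Str.find st "]")) = "NOTE"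
      · have hsw := hiffN.mpr ⟨hnn, hN⟩
        clear hiffN hiffW hiffT hiffD
        simp_all [pvAlertStyles, PySem.Dict.get?_mk_cons]
      · by_cases hW : PySem.Str.slice st (some 3) (some (PySem.Str.find st "]")) = "WARNING"
        · have hswN : PySem.Str.startswith st ">[!NOTE]" = false :=
            Bool.eq_false_iff.mpr (fun h => hN ((hiffN.mp h).2))
          have hsw := hiffW.mpr ⟨hnn, hW⟩
          clear hiffN hiffW hiffT hiffD
          simp_all [pvAlertStyles, PySem.Dict.get?_mk_cons]
        · by_cases hT : PySem.Str.slice st (some 3) (some (PySem.Str.find st "]")) = "TIP"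
          · have hswN : PySem.Str.startswith st ">[!NOTE]" = false :=
              Bool.eq_false_iff.mpr (fun h => hN ((hiffN.mp h).2))
            have hswW : PySem.Str.startswith st ">[!WARNING]" = false :=
              Bool.eq_false_iff.mpr (fun h => hW ((hiffW.mp h).2))
            have hsw := hiffT.mpr ⟨hnn, hT⟩
            clear hiffN hiffW hiffT hiffD
            simp_all [pvAlertStyles, PySem.Dict.get?_mk_cons]
          · by_cases hD : PySem.Str.slice st (some 3) (some (PySem.Str.find st "]")) = "DANGER"
            · have hswN : PySem.Str.startswith st ">[!NOTE]" = false :=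
                Bool.eq_false_iff.mpr (fun h => hN ((hiffN.mp h).2))
              have hswW : PySem.Str.startswith st ">[!WARNING]" = false :=
                Bool.eq_false_iff.mpr (fun h => hW ((hiffW.mp h).2))
              have hswT : PySem.Str.startswith st ">[!TIP]" = false :=
                Bool.eq_false_iff.mpr (fun h => hT ((hiffT.mp h).2))
              have hsw := hiffD.mpr ⟨hnn, hD⟩
              clear hiffN hiffW hiffT hiffD
              simp_all [pvAlertStyles, PySem.Dict.get?_mk_cons]
            · have hswN : PySem.Str.startswith st ">[!NOTE]" = false :=
                Bool.eq_false_iff.mpr (fun h => hN ((hiffN.mp h).2))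
              have hswW : PySem.Str.startswith st ">[!WARNING]" = false :=
                Bool.eq_false_iff.mpr (fun h => hW ((hiffW.mp h).2))
              have hswT : PySem.Str.startswith st ">[!TIP]" = false :=
                Bool.eq_false_iff.mpr (fun h => hT ((hiffT.mp h).2))
              have hswD : PySem.Str.startswith st ">[!DANGER]" = false :=
                Bool.eq_false_iff.mpr (fun h => hD ((hiffD.mp h).2))
              clear hiffN hiffW hiffT hiffD
              simp_all [pvAlertStyles, PySem.Dict.get?_mk_cons]
              rw [if_neg (fun h => hN h.symm), if_neg (fun h => hW h.symm),
                  if_neg (fun h => hT h.symm), if_neg (fun h => hD h.symm)]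
              simp [PySem.Dict.get?]
    · have hne : PySem.Str.find st "]" = -1 := by
        have := PySem.Chars.neg_one_le_find st.toList ("]" : String).toList
        rw [PySem.Str.find_eq] at hnn ⊢
        omega
      have hswN : PySem.Str.startswith st ">[!NOTE]" = false := Bool.eq_false_iff.mpr (fun h =>
        hnn ((pv_strmarker_iff st "NOTE" (by decide) hp).mp (by rw [pv_cat_note]; exact h)).1)
      have hswW : PySem.Str.startswith st ">[!WARNING]" = false := Bool.eq_false_iff.mpr (fun h =>
        hnn ((pv_strmarker_iff st "WARNING" (by decide) hp).mp (by rw [pv_cat_warning]; exact h)).1)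
      have hswT : PySem.Str.startswith st ">[!TIP]" = false := Bool.eq_false_iff.mpr (fun h =>
        hnn ((pv_strmarker_iff st "TIP" (by decide) hp).mp (by rw [pv_cat_tip]; exact h)).1)
      have hswD : PySem.Str.startswith st ">[!DANGER]" = false := Bool.eq_false_iff.mpr (fun h =>
        hnn ((pv_strmarker_iff st "DANGER" (by decide) hp).mp (by rw [pv_cat_danger]; exact h)).1)
      simp_all
  · have hswN : PySem.Str.startswith st ">[!NOTE]" = false := Bool.eq_false_iff.mpr (fun h =>
      hp (pv_sw_of_marker st ">[!NOTE]" h (by decide)))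
    have hswW : PySem.Str.startswith st ">[!WARNING]" = false := Bool.eq_false_iff.mpr (fun h =>
      hp (pv_sw_of_marker st ">[!WARNING]" h (by decide)))
    have hswT : PySem.Str.startswith st ">[!TIP]" = false := Bool.eq_false_iff.mpr (fun h =>
      hp (pv_sw_of_marker st ">[!TIP]" h (by decide)))
    have hswD : PySem.Str.startswith st ">[!DANGER]" = false := Bool.eq_false_iff.mpr (fun h =>
      hp (pv_sw_of_marker st ">[!DANGER]" h (by decide)))
    simp_all

-- ===== VERDICT (by name: the statement is the Claim_ definition above) =====
set_option maxHeartbeats 1000000 in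
theorem parse_alerts_spec : Claim_equal_parse_alerts := by
  intro text _
  unfold Spec_parse_alerts parse_alerts parse_alerts_alt
  rw [show (fun (result : List String) (line : String) =>
      let stripped := PySem.Str.strip line
      if PySem.Str.startswith stripped ">[!NOTE]" then
        result ++ ["<div class=\"alert alert-note\">📝 " ++ PySem.Str.strip (PySem.Str.replace stripped ">[!NOTE]" "") ++ "</div>"]
      else if PySem.Str.startswith stripped ">[!WARNING]" then
        result ++ ["<div class=\"alert alert-warning\">⚠️ " ++ PySem.Str.strip (PySem.Str.replace stripped ">[!WARNING]" "") ++ "</div>"]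
      else if PySem.Str.startswith stripped ">[!TIP]" then
        result ++ ["<div class=\"alert alert-tip\">💡 " ++ PySem.Str.strip (PySem.Str.replace stripped ">[!TIP]" "") ++ "</div>"]
      else if PySem.Str.startswith stripped ">[!DANGER]" then
        result ++ ["<div class=\"alert alert-danger\">🚨 " ++ PySem.Str.strip (PySem.Str.replace stripped ">[!DANGER]" "") ++ "</div>"]
      else
        result ++ [line]) = fun acc line => acc ++ [pvRender line] from
    funext fun a => funext fun l => by
      rw [← pvBody_eq l]
      simp only []
      split_ifs <;> rfl]
  simp only [PySem.List.foldl_append_singleton_eq_map, List.nil_append]
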